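-- pv_equiv track=rewrite | github.com/BenWSingleton/Stevens-Classes | CS-115/Labs/lab10.py | innerCells
-- ===== SOURCE A (Python) =====
-- def createOneRow(width):
--     """Returns one row of zeros of width "width"...
--        You should use this in your
--        createBoard(width, height) function."""
--     row = []
--     for col in range(width):
--         row += [0]
--     return row
--
-- def createBoard(width, height):
--     """returns a 2d array with "height" rows and "width" cols"""
--     A = []
--     for row in range(height):
--         A += [createOneRow(width)]
--     return A
--
-- def innerCells(w,h):
--     A = createBoard(w,h)
--     for row in range(h):
--         for col in range(w):
--             if row==0:
--                 A[row][col]=0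
--             elif col==0:
--                 A[row][col]=0
--             elif row==(h-1):
--                 A[row][col]=0
--             elif col==(w-1):
--                 A[row][col]=0
--             else:
--                 A[row][col]=1
--     return A
-- ===== SOURCE B (Python) =====
-- def innerCells(w, h):
--     out = []
--     for row in range(h):
--         if row == 0 or row == h - 1:
--             out.append([0] * w)
--         else:
--             r = [1] * w
--             if w > 0:
--                 r[0] = 0
--                 r[w - 1] = 0
--             out.append(r)
--     return out
-- ===== Notes on version B (the rewrite author's own statement) =====
-- stated objective: simpler
-- what changed: Builds the grid row by row keyed on row type (border rows are all zeros, interior rows are ones with the two end cells zeroed) instead of allocating a zero board and then testing four conditions per cell; whole rows are made with [v]*w instead of per-cell writes.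
import Mathlib
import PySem

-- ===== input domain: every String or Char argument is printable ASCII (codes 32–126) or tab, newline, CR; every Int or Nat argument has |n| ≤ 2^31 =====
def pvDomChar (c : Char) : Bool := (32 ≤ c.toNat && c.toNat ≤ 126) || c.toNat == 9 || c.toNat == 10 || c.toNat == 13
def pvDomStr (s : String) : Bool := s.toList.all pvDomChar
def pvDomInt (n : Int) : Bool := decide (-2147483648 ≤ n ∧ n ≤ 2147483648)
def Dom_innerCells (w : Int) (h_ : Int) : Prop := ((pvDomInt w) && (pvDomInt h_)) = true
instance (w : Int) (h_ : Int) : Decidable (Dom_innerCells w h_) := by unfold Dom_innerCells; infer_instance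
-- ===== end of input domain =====

-- B builds the grid row by row keyed on row type (border rows all zeros, interior rows ones
-- with the end cells zeroed) instead of allocating a zero board and testing four conditions per cell; objective: simpler.


-- ===== PORT A =====
def createOneRow (width : Int) : List Int :=
  (PySem.List.pyRange 0 width 1).foldl (fun row _ => row ++ [(0 : Int)]) []

def createBoard (width height : Int) : List (List Int) :=
  (PySem.List.pyRange 0 height 1).foldl (fun A _ => A ++ [createOneRow width]) []

-- A[row][col] = v.  row/col come from range(h)/range(w), hence are in range and nonnegative,
-- so List.set on .toNat indices is exact here.
def setCell (A : List (List Int)) (row col : Int) (v : Int) : List (List Int) :=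
  A.set row.toNat ((A.getD row.toNat []).set col.toNat v)

def innerCells (w : Int) (h_ : Int) : List (List Int) :=
  let A0 := createBoard w h_
  (PySem.List.pyRange 0 h_ 1).foldl (fun A row =>
    (PySem.List.pyRange 0 w 1).foldl (fun A col =>
      if row = 0 then setCell A row col 0
      else if col = 0 then setCell A row col 0
      else if row = h_ - 1 then setCell A row col 0
      else if col = w - 1 then setCell A row col 0
      else setCell A row col 1) A) A0

-- ===== PORT B =====
def innerCells_alt (w : Int) (h_ : Int) : List (List Int) :=
  (PySem.List.pyRange 0 h_ 1).foldl (fun out row =>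
    if row = 0 ∨ row = h_ - 1 then out ++ [List.replicate w.toNat (0 : Int)]
    else
      let r := List.replicate w.toNat (1 : Int)
      let r := if 0 < w then (r.set 0 0).set (w.toNat - 1) 0 else r
      out ++ [r]) []

-- ===== PRECONDITION & SPEC =====
def Spec_innerCells (w : Int) (h_ : Int) (out : List (List Int)) : Prop := out = innerCells_alt w h_
instance (w : Int) (h_ : Int) (out : List (List Int)) : Decidable (Spec_innerCells w h_ out) := by unfold Spec_innerCells; infer_instance

-- ===== CLAIM (what is proved, stated in full; the proofs are below) =====
def Claim_equal_innerCells : Prop := ∀ (w : Int) (h_ : Int), Dom_innerCells w h_ → Spec_innerCells w h_ (innerCells w h_)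

-- ===== LEMMAS AND PROOFS =====

theorem pyRange_zero_int (n : Int) :
    PySem.List.pyRange 0 n 1 = (List.range n.toNat).map (fun k : Nat => (k : Int)) := by
  by_cases h : 0 ≤ n
  · have := PySem.List.pyRange_zero_natCast n.toNat
    rw [Int.toNat_of_nonneg h] at this; exact this
  · rw [Int.toNat_of_nonpos (by omega)]
    simp [PySem.List.pyRange]
    omega

-- the cell value A's if-chain assigns at (row, col)
def gCell (w h_ row col : Int) : Int :=
  if row = 0 then 0 else if col = 0 then 0
  else if row = h_ - 1 then 0 else if col = w - 1 then 0 else 1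

-- folding `set i (f i)` over a list of indices: length is preserved …
theorem setFold_length {α : Type} (f : Nat → α) :
    ∀ (cs : List Nat) (xs : List α),
      (cs.foldl (fun rl c => rl.set c (f c)) xs).length = xs.length := by
  intro cs
  induction cs with
  | nil => intro xs; rfl
  | cons c cs ih => intro xs; simp [List.foldl_cons, ih]

-- … and each entry is `f i` if i was visited, else the original entry
theorem setFold_get {α : Type} (f : Nat → α) :
    ∀ (cs : List Nat) (xs : List α) (i : Nat), i < xs.length →
      ∀ (d : α), (cs.foldl (fun rl c => rl.set c (f c)) xs).getD i d
        = if i ∈ cs then f i else xs.getD i d := by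
  intro cs
  induction cs with
  | nil => intro xs i hi d; simp
  | cons c cs ih =>
    intro xs i hi d
    rw [List.foldl_cons, ih _ i (by simpa using hi) d]
    by_cases hmem : i ∈ cs
    · simp [hmem]
    · by_cases hic : i = c
      · subst hic
        simp [hmem, hi, List.getD]
      · have hci : c ≠ i := fun h => hic h.symm
        simp [hmem, hic, List.getD, hci]

-- hoisting: the inner column loop only rewrites row r
theorem inner_hoist (f : Nat → Int) (r : Nat) :
    ∀ (cs : List Nat) (A : List (List Int)),
      cs.foldl (fun A c => A.set r ((A.getD r []).set c (f c))) A
        = A.set r (cs.foldl (fun rl c => rl.set c (f c)) (A.getD r [])) := by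
  intro cs
  induction cs with
  | nil =>
    intro A
    by_cases hr : r < A.length
    · simp [List.getD, List.getElem?_eq_getElem hr, List.set_getElem_self]
    · have hle : A.length ≤ r := by omega
      rw [List.set_eq_of_length_le hle]
      rfl
  | cons c cs ih =>
    intro A
    rw [List.foldl_cons, List.foldl_cons, ih]
    have hgd : ((A.set r ((A.getD r []).set c (f c))).getD r [])
        = (A.getD r []).set c (f c) := by
      by_cases hr : r < A.length
      · simp [List.getD, hr]
      · have hle : A.length ≤ r := by omega
        rw [List.set_eq_of_length_le hle]
        simp [List.getD, List.getElem?_eq_none_iff.mpr hle]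
    rw [hgd, List.set_set]

-- the row the inner loop produces (as B also produces it, entrywise)
def targetRow (w h_ : Int) (r : Nat) : List Int :=
  (List.range w.toNat).map (fun c : Nat => gCell w h_ (r : Int) (c : Int))

theorem rowFold_eq_targetRow (w h_ : Int) (r : Nat) (xs : List Int)
    (hlen : xs.length = w.toNat) :
    (List.range w.toNat).foldl
        (fun rl c => rl.set c (gCell w h_ (r : Int) (c : Int))) xs
      = targetRow w h_ r := by
  apply List.ext_getElem
  · rw [setFold_length]; simp [targetRow, hlen]
  · intro i hi₁ hi₂
    have hiw : i < w.toNat := by simpa [targetRow] using hi₂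
    have hg := setFold_get (fun c => gCell w h_ (r : Int) (c : Int))
      (List.range w.toNat) xs i (by omega) 0
    have hl : i < (List.range w.toNat |>.foldl
        (fun rl c => rl.set c (gCell w h_ (r : Int) (c : Int))) xs).length := by
      rw [setFold_length]; omega
    rw [List.getD_eq_getElem _ _ hl] at hg
    simp only [hg, List.mem_range, hiw, if_true]
    simp [targetRow]

-- the outer loop, with every intermediate row of length w.toNat, sets row r to targetRow r
theorem outer_fold_eq (w h_ : Int) :
    ∀ (rs : List Nat) (A : List (List Int)), (∀ rl ∈ A, rl.length = w.toNat) →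
      rs.foldl (fun A r =>
          (List.range w.toNat).foldl
            (fun A c => A.set r ((A.getD r []).set c (gCell w h_ (r : Int) (c : Int)))) A) A
        = rs.foldl (fun A r => A.set r (targetRow w h_ r)) A := by
  intro rs
  induction rs with
  | nil => intro A _; rfl
  | cons r rs ih =>
    intro A hA
    rw [List.foldl_cons, List.foldl_cons, inner_hoist]
    by_cases hr : r < A.length
    · have hlen : (A.getD r []).length = w.toNat := by
        rw [List.getD, List.getElem?_eq_getElem hr]
        exact hA _ (List.getElem_mem hr)
      rw [rowFold_eq_targetRow w h_ r _ hlen]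
      apply ih
      intro rl hrl
      rcases List.mem_or_eq_of_mem_set hrl with h | h
      · exact hA _ h
      · subst h; simp [targetRow]
    · have hle : A.length ≤ r := by omega
      have hnoop : ∀ (y : List Int), A.set r y = A :=
        fun y => List.set_eq_of_length_le hle
      have hgd : A.getD r [] = [] := by
        simp [List.getD, List.getElem?_eq_none_iff.mpr hle]
      have hxs : (List.range w.toNat).foldl
          (fun rl c => rl.set c (gCell w h_ (r : Int) (c : Int))) (A.getD r []) = [] := by
        have := setFold_length (fun c => gCell w h_ (r : Int) (c : Int)) (List.range w.toNat) (A.getD r [])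
        rw [hgd] at this ⊢
        exact List.eq_nil_of_length_eq_zero this
      rw [hxs, hnoop, hnoop]
      exact ih A hA

-- B's per-row value
def rowB (w h_ : Int) (row : Int) : List Int :=
  if row = 0 ∨ row = h_ - 1 then List.replicate w.toNat (0 : Int)
  else if 0 < w then ((List.replicate w.toNat (1 : Int)).set 0 0).set (w.toNat - 1) 0
  else List.replicate w.toNat (1 : Int)

theorem targetRow_eq_rowB (w h_ : Int) (r : Nat) (hr : (r : Int) < h_) :
    targetRow w h_ r = rowB w h_ (r : Int) := by
  apply List.ext_getElem
  · simp only [targetRow, rowB, List.length_map, List.length_range]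
    split_ifs <;> simp
  · intro i hi₁ hi₂
    have hiw : i < w.toNat := by simpa [targetRow] using hi₁
    have hw : 0 < w := by omega
    simp only [targetRow, List.getElem_map, List.getElem_range]
    have hL : gCell w h_ (r : Int) (i : Int)
        = (if i = 0 ∨ i = w.toNat - 1 ∨ (r : Int) = 0 ∨ (r : Int) = h_ - 1
           then 0 else 1) := by
      unfold gCell; split_ifs <;> omega
    rw [hL]
    by_cases hb : (r : Int) = 0 ∨ (r : Int) = h_ - 1
    · rw [if_pos (by tauto)]
      unfold rowB
      simp only [if_pos hb, List.getElem_replicate]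
    · simp only [rowB, if_neg hb, if_pos hw, List.getElem_set, List.getElem_replicate]
      split_ifs <;> omega

theorem innerCells_alt_eq (w h_ : Int) :
    innerCells_alt w h_ = (List.range h_.toNat).map (fun r : Nat => rowB w h_ (r : Int)) := by
  unfold innerCells_alt
  rw [pyRange_zero_int, List.foldl_map]
  have hstep : (fun (out : List (List Int)) (k : Nat) =>
      if (k : Int) = 0 ∨ (k : Int) = h_ - 1 then out ++ [List.replicate w.toNat (0 : Int)]
      else
        let r := List.replicate w.toNat (1 : Int)
        let r := if 0 < w then (r.set 0 0).set (w.toNat - 1) 0 else r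
        out ++ [r])
      = fun (out : List (List Int)) (k : Nat) => out ++ [rowB w h_ (k : Int)] := by
    funext out k
    simp only [rowB]
    split_ifs <;> rfl
  rw [hstep, PySem.List.foldl_append_singleton_eq_map]
  simp

theorem createOneRow_eq (w : Int) : createOneRow w = List.replicate w.toNat (0 : Int) := by
  unfold createOneRow
  rw [pyRange_zero_int,
    show (fun (row : List Int) (_ : Int) => row ++ [(0 : Int)])
        = fun row x => row ++ [(fun _ : Int => (0 : Int)) x] from rfl,
    PySem.List.foldl_append_singleton_eq_map]
  apply List.ext_getElem <;> simp

theorem createBoard_eq (w h_ : Int) :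
    createBoard w h_ = List.replicate h_.toNat (List.replicate w.toNat (0 : Int)) := by
  unfold createBoard
  rw [pyRange_zero_int, createOneRow_eq,
    show (fun (A : List (List Int)) (_ : Int) => A ++ [List.replicate w.toNat (0 : Int)])
        = fun A x => A ++ [(fun _ : Int => List.replicate w.toNat (0 : Int)) x] from rfl,
    PySem.List.foldl_append_singleton_eq_map]
  apply List.ext_getElem <;> simp

theorem innerCells_eq (w h_ : Int) :
    innerCells w h_ = (List.range h_.toNat).map (fun r : Nat => rowB w h_ (r : Int)) := by
  unfold innerCells
  rw [pyRange_zero_int, pyRange_zero_int, List.foldl_map]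
  -- the if-chain is setCell with gCell's value
  have hstep : (fun (A : List (List Int)) (k : Nat) =>
      (List.map (fun c : Nat => (c : Int)) (List.range w.toNat)).foldl
        (fun A col =>
          if (k : Int) = 0 then setCell A (k : Int) col 0
          else if col = 0 then setCell A (k : Int) col 0
          else if (k : Int) = h_ - 1 then setCell A (k : Int) col 0
          else if col = w - 1 then setCell A (k : Int) col 0
          else setCell A (k : Int) col 1) A)
      = fun (A : List (List Int)) (k : Nat) =>
          (List.range w.toNat).foldl
            (fun A c => A.set k ((A.getD k []).set c (gCell w h_ (k : Int) (c : Int)))) A := by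
    funext A k
    rw [List.foldl_map]
    apply PySem.List.foldl_congr_mem
    intro A' c _
    simp only [gCell, setCell, Int.toNat_natCast]
    split_ifs <;> rfl
  rw [hstep, outer_fold_eq]
  · rw [createBoard_eq]
    -- the fold of `set r (targetRow r)` over range H on the zero board is the row map
    apply List.ext_getElem
    · rw [setFold_length]; simp
    · intro i hi₁ hi₂
      have hiH : i < h_.toNat := by simpa using hi₂
      have hg := setFold_get (targetRow w h_) (List.range h_.toNat)
        (List.replicate h_.toNat (List.replicate w.toNat (0 : Int))) i (by simpa using hiH) []
      rw [List.getD_eq_getElem _ _ hi₁] at hg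
      simp only [hg, List.mem_range, hiH, if_true]
      simp [targetRow_eq_rowB w h_ i (by omega)]
  · rw [createBoard_eq]
    intro rl hrl
    rw [List.eq_of_mem_replicate hrl]
    simp

-- ===== VERDICT (by name: the statement is the Claim_ definition above) =====
theorem innerCells_spec : Claim_equal_innerCells := by
  intro w h_ _
  unfold Spec_innerCells
  rw [innerCells_eq, innerCells_alt_eq]
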